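-- pv_equiv track=rewrite | github.com/undergroundrap/devbootLLM | scripts/real_job_readiness.py | assess_project_capability
-- ===== SOURCE A (Python) =====
-- def assess_project_capability(lessons, lang):
--     """Can students build a real project?"""
--
--     if lang == 'python':
--         # Can they build a Flask/Django app with database?
--         web_lessons = [l for l in lessons if any(fw in l['title'].lower()
--                                                    for fw in ['flask', 'django', 'fastapi'])]
--         db_lessons = [l for l in lessons if any(db in l['title'].lower()
--                                                   for db in ['sql', 'database', 'orm'])]
--
--         has_routes = any('@app.route' in l.get('fullSolution', '') or
--                         '@api.get' in l.get('fullSolution', '') or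
--                         'path(' in l.get('fullSolution', '')
--                         for l in web_lessons)
--
--         has_models = any('class' in l.get('fullSolution', '') and
--                         ('Model' in l.get('fullSolution', '') or
--                          'db.' in l.get('fullSolution', ''))
--                         for l in db_lessons)
--
--         return {
--             'web_framework': len(web_lessons) >= 10,
--             'database': len(db_lessons) >= 5,
--             'routes': has_routes,
--             'models': has_models,
--             'ready': len(web_lessons) >= 10 and len(db_lessons) >= 5 and has_routes and has_models
--         }
--
--     else:  # java
--         # Can they build a Spring Boot app with JPA?
--         spring_lessons = [l for l in lessons if 'spring' in l['title'].lower()]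
--         jpa_lessons = [l for l in lessons if any(term in l['title'].lower()
--                                                    for term in ['jpa', 'hibernate', 'database'])]
--
--         has_controllers = any('@RestController' in l.get('fullSolution', '') or
--                              '@Controller' in l.get('fullSolution', '')
--                              for l in spring_lessons)
--
--         has_entities = any('@Entity' in l.get('fullSolution', '')
--                           for l in jpa_lessons)
--
--         return {
--             'spring_boot': len(spring_lessons) >= 15,
--             'database': len(jpa_lessons) >= 5,
--             'controllers': has_controllers,
--             'entities': has_entities,
--             'ready': len(spring_lessons) >= 15 and len(jpa_lessons) >= 5 and has_controllers and has_entities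
--         }
-- ===== SOURCE B (Python) =====
-- def assess_project_capability(lessons, lang):
--     """Can students build a real project? (single-pass over lessons)"""
--     if lang == 'python':
--         web = 0
--         db = 0
--         has_routes = False
--         has_models = False
--         for l in lessons:
--             t = l['title'].lower()
--             sol = l.get('fullSolution', '')
--             if 'flask' in t or 'django' in t or 'fastapi' in t:
--                 web += 1
--                 has_routes = has_routes or '@app.route' in sol or '@api.get' in sol or 'path(' in sol
--             if 'sql' in t or 'database' in t or 'orm' in t:
--                 db += 1
--                 has_models = has_models or ('class' in sol and ('Model' in sol or 'db.' in sol))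
--         return {
--             'web_framework': web >= 10,
--             'database': db >= 5,
--             'routes': has_routes,
--             'models': has_models,
--             'ready': web >= 10 and db >= 5 and has_routes and has_models
--         }
--     else:
--         spring = 0
--         jpa = 0
--         has_controllers = False
--         has_entities = False
--         for l in lessons:
--             t = l['title'].lower()
--             sol = l.get('fullSolution', '')
--             if 'spring' in t:
--                 spring += 1
--                 has_controllers = has_controllers or '@RestController' in sol or '@Controller' in sol
--             if 'jpa' in t or 'hibernate' in t or 'database' in t:
--                 jpa += 1
--                 has_entities = has_entities or '@Entity' in sol
--         return {
--             'spring_boot': spring >= 15,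
--             'database': jpa >= 5,
--             'controllers': has_controllers,
--             'entities': has_entities,
--             'ready': spring >= 15 and jpa >= 5 and has_controllers and has_entities
--         }
-- ===== Notes on version B (the rewrite author's own statement) =====
-- stated objective: alternative
-- what changed: Replaces the four list-comprehension/any passes per language branch with one fused loop that maintains running counts and boolean flags, lowercasing each title once.
import Mathlib
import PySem

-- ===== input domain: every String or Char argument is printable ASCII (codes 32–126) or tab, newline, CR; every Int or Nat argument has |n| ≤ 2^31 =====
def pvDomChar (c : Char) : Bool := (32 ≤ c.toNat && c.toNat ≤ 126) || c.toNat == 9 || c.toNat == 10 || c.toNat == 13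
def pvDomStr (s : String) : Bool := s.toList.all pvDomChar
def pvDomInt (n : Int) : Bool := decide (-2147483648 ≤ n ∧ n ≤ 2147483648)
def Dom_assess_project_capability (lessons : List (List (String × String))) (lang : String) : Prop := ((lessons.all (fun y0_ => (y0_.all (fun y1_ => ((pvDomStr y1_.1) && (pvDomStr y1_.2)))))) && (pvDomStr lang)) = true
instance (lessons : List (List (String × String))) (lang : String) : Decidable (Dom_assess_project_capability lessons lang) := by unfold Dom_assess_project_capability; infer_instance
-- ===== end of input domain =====

-- B fuses the four comprehension/any passes of each language branch into ONE loop keeping counts and flags (alternative decomposition).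
-- Pre_ excludes lessons without a 'title' key, on which Python A raises KeyError.


-- ===== PORT A =====
-- shared accessors: l['title'].lower() (total via getD; Pre_ guarantees the key) and l.get('fullSolution', '')
def pvTitle (l : List (String × String)) : String :=
  PySem.Str.lower (PySem.Dict.getD (PySem.Dict.mk l) "title" "")
def pvSol (l : List (String × String)) : String :=
  PySem.Dict.getD (PySem.Dict.mk l) "fullSolution" ""
-- A's membership tests, named so the ports read like their Pythons
def pvWebHit (l : List (String × String)) : Bool :=
  ["flask", "django", "fastapi"].any (fun fw => PySem.Str.isIn fw (pvTitle l))
def pvDbHit (l : List (String × String)) : Bool :=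
  ["sql", "database", "orm"].any (fun db => PySem.Str.isIn db (pvTitle l))
def pvRouteHit (l : List (String × String)) : Bool :=
  PySem.Str.isIn "@app.route" (pvSol l) || PySem.Str.isIn "@api.get" (pvSol l) || PySem.Str.isIn "path(" (pvSol l)
def pvModelHit (l : List (String × String)) : Bool :=
  PySem.Str.isIn "class" (pvSol l) && (PySem.Str.isIn "Model" (pvSol l) || PySem.Str.isIn "db." (pvSol l))
def pvSpringHit (l : List (String × String)) : Bool :=
  PySem.Str.isIn "spring" (pvTitle l)
def pvJpaHit (l : List (String × String)) : Bool :=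
  ["jpa", "hibernate", "database"].any (fun term => PySem.Str.isIn term (pvTitle l))
def pvCtrlHit (l : List (String × String)) : Bool :=
  PySem.Str.isIn "@RestController" (pvSol l) || PySem.Str.isIn "@Controller" (pvSol l)
def pvEntityHit (l : List (String × String)) : Bool :=
  PySem.Str.isIn "@Entity" (pvSol l)

def assess_project_capability (lessons : List (List (String × String))) (lang : String) : List (String × Bool) :=
  if lang == "python" then
    let web_lessons := lessons.filter pvWebHit
    let db_lessons := lessons.filter pvDbHit
    let has_routes := web_lessons.any pvRouteHit
    let has_models := db_lessons.any pvModelHit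
    [("web_framework", decide (10 ≤ web_lessons.length)),
     ("database", decide (5 ≤ db_lessons.length)),
     ("routes", has_routes),
     ("models", has_models),
     ("ready", decide (10 ≤ web_lessons.length) && decide (5 ≤ db_lessons.length) && has_routes && has_models)]
  else
    let spring_lessons := lessons.filter pvSpringHit
    let jpa_lessons := lessons.filter pvJpaHit
    let has_controllers := spring_lessons.any pvCtrlHit
    let has_entities := jpa_lessons.any pvEntityHit
    [("spring_boot", decide (15 ≤ spring_lessons.length)),
     ("database", decide (5 ≤ jpa_lessons.length)),
     ("controllers", has_controllers),
     ("entities", has_entities),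
     ("ready", decide (15 ≤ spring_lessons.length) && decide (5 ≤ jpa_lessons.length) && has_controllers && has_entities)]

-- ===== PORT B =====
-- one fused loop step per language: state = (count1, count2, flag1, flag2)
def pvStepPy (st : Nat × Nat × Bool × Bool) (l : List (String × String)) : Nat × Nat × Bool × Bool :=
  let t := PySem.Str.lower (PySem.Dict.getD (PySem.Dict.mk l) "title" "")
  let sol := PySem.Dict.getD (PySem.Dict.mk l) "fullSolution" ""
  let st1 :=
    if PySem.Str.isIn "flask" t || PySem.Str.isIn "django" t || PySem.Str.isIn "fastapi" t then
      (st.1 + 1, st.2.1,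
       st.2.2.1 || PySem.Str.isIn "@app.route" sol || PySem.Str.isIn "@api.get" sol || PySem.Str.isIn "path(" sol,
       st.2.2.2)
    else st
  if PySem.Str.isIn "sql" t || PySem.Str.isIn "database" t || PySem.Str.isIn "orm" t then
    (st1.1, st1.2.1 + 1, st1.2.2.1,
     st1.2.2.2 || (PySem.Str.isIn "class" sol && (PySem.Str.isIn "Model" sol || PySem.Str.isIn "db." sol)))
  else st1

def pvStepJava (st : Nat × Nat × Bool × Bool) (l : List (String × String)) : Nat × Nat × Bool × Bool :=
  let t := PySem.Str.lower (PySem.Dict.getD (PySem.Dict.mk l) "title" "")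
  let sol := PySem.Dict.getD (PySem.Dict.mk l) "fullSolution" ""
  let st1 :=
    if PySem.Str.isIn "spring" t then
      (st.1 + 1, st.2.1,
       st.2.2.1 || PySem.Str.isIn "@RestController" sol || PySem.Str.isIn "@Controller" sol,
       st.2.2.2)
    else st
  if PySem.Str.isIn "jpa" t || PySem.Str.isIn "hibernate" t || PySem.Str.isIn "database" t then
    (st1.1, st1.2.1 + 1, st1.2.2.1, st1.2.2.2 || PySem.Str.isIn "@Entity" sol)
  else st1

def assess_project_capability_alt (lessons : List (List (String × String))) (lang : String) : List (String × Bool) :=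
  if lang == "python" then
    let st := lessons.foldl pvStepPy (0, 0, false, false)
    [("web_framework", decide (10 ≤ st.1)),
     ("database", decide (5 ≤ st.2.1)),
     ("routes", st.2.2.1),
     ("models", st.2.2.2),
     ("ready", decide (10 ≤ st.1) && decide (5 ≤ st.2.1) && st.2.2.1 && st.2.2.2)]
  else
    let st := lessons.foldl pvStepJava (0, 0, false, false)
    [("spring_boot", decide (15 ≤ st.1)),
     ("database", decide (5 ≤ st.2.1)),
     ("controllers", st.2.2.1),
     ("entities", st.2.2.2),
     ("ready", decide (15 ≤ st.1) && decide (5 ≤ st.2.1) && st.2.2.1 && st.2.2.2)]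

-- ===== PRECONDITION & SPEC =====
-- Pre_ excludes lessons missing the 'title' key: Python A raises KeyError there (l['title']).
def Pre_assess_project_capability (lessons : List (List (String × String))) (lang : String) : Prop :=
  (lessons.all (fun l => (PySem.Dict.mk l).contains "title")) = true
instance (lessons : List (List (String × String))) (lang : String) : Decidable (Pre_assess_project_capability lessons lang) := by unfold Pre_assess_project_capability; infer_instance

def pvWitness_assess_project_capability : (List (List (String × String))) × String :=
  ([[("title", "Flask Intro"), ("fullSolution", "@app.route")]], "python")

def Spec_assess_project_capability (lessons : List (List (String × String))) (lang : String) (out : List (String × Bool)) : Prop := out = assess_project_capability_alt lessons lang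
instance (lessons : List (List (String × String))) (lang : String) (out : List (String × Bool)) : Decidable (Spec_assess_project_capability lessons lang out) := by unfold Spec_assess_project_capability; infer_instance

-- ===== CLAIM (what is proved, stated in full; the proofs are below) =====
def Claim_equal_assess_project_capability : Prop := ∀ (lessons : List (List (String × String))) (lang : String), Dom_assess_project_capability lessons lang → Pre_assess_project_capability lessons lang → Spec_assess_project_capability lessons lang (assess_project_capability lessons lang)

-- ===== LEMMAS AND PROOFS =====

-- A's any-over-list membership tests are B's or-chains, pointwise
lemma pvWebHit_eq (l : List (String × String)) :
    pvWebHit l = (PySem.Str.isIn "flask" (PySem.Str.lower (PySem.Dict.getD (PySem.Dict.mk l) "title" ""))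
      || PySem.Str.isIn "django" (PySem.Str.lower (PySem.Dict.getD (PySem.Dict.mk l) "title" ""))
      || PySem.Str.isIn "fastapi" (PySem.Str.lower (PySem.Dict.getD (PySem.Dict.mk l) "title" ""))) := by
  simp only [pvWebHit, pvTitle, List.any_cons, List.any_nil, Bool.or_false, Bool.or_assoc]

lemma pvDbHit_eq (l : List (String × String)) :
    pvDbHit l = (PySem.Str.isIn "sql" (PySem.Str.lower (PySem.Dict.getD (PySem.Dict.mk l) "title" ""))
      || PySem.Str.isIn "database" (PySem.Str.lower (PySem.Dict.getD (PySem.Dict.mk l) "title" ""))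
      || PySem.Str.isIn "orm" (PySem.Str.lower (PySem.Dict.getD (PySem.Dict.mk l) "title" ""))) := by
  simp only [pvDbHit, pvTitle, List.any_cons, List.any_nil, Bool.or_false, Bool.or_assoc]

lemma pvSpringHit_eq (l : List (String × String)) :
    pvSpringHit l = PySem.Str.isIn "spring" (PySem.Str.lower (PySem.Dict.getD (PySem.Dict.mk l) "title" "")) := by
  simp only [pvSpringHit, pvTitle]

lemma pvJpaHit_eq (l : List (String × String)) :
    pvJpaHit l = (PySem.Str.isIn "jpa" (PySem.Str.lower (PySem.Dict.getD (PySem.Dict.mk l) "title" ""))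
      || PySem.Str.isIn "hibernate" (PySem.Str.lower (PySem.Dict.getD (PySem.Dict.mk l) "title" ""))
      || PySem.Str.isIn "database" (PySem.Str.lower (PySem.Dict.getD (PySem.Dict.mk l) "title" ""))) := by
  simp only [pvJpaHit, pvTitle, List.any_cons, List.any_nil, Bool.or_false, Bool.or_assoc]

-- the fused loop computes exactly A's two filter-lengths and two filtered anys
lemma pvFoldPy (lessons : List (List (String × String))) (st : Nat × Nat × Bool × Bool) :
    lessons.foldl pvStepPy st =
      (st.1 + (lessons.filter pvWebHit).length,
       st.2.1 + (lessons.filter pvDbHit).length,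
       st.2.2.1 || (lessons.filter pvWebHit).any pvRouteHit,
       st.2.2.2 || (lessons.filter pvDbHit).any pvModelHit) := by
  induction lessons generalizing st with
  | nil => simp
  | cons l tl ih =>
    rw [List.foldl_cons, ih]
    simp only [pvStepPy, ← pvWebHit_eq, ← pvDbHit_eq, List.filter_cons]
    by_cases hw : pvWebHit l = true <;> by_cases hd : pvDbHit l = true <;>
      simp [hw, hd, pvRouteHit, pvModelHit, pvSol, Bool.or_assoc] <;> omega

lemma pvFoldJava (lessons : List (List (String × String))) (st : Nat × Nat × Bool × Bool) :
    lessons.foldl pvStepJava st =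
      (st.1 + (lessons.filter pvSpringHit).length,
       st.2.1 + (lessons.filter pvJpaHit).length,
       st.2.2.1 || (lessons.filter pvSpringHit).any pvCtrlHit,
       st.2.2.2 || (lessons.filter pvJpaHit).any pvEntityHit) := by
  induction lessons generalizing st with
  | nil => simp
  | cons l tl ih =>
    rw [List.foldl_cons, ih]
    simp only [pvStepJava, ← pvSpringHit_eq, ← pvJpaHit_eq, List.filter_cons]
    by_cases hw : pvSpringHit l = true <;> by_cases hd : pvJpaHit l = true <;>
      simp [hw, hd, pvCtrlHit, pvEntityHit, pvSol, Bool.or_assoc] <;> omega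

-- ===== VERDICT (by name: the statement is the Claim_ definition above) =====
theorem assess_project_capability_spec : Claim_equal_assess_project_capability := by
  intro lessons lang _ _
  unfold Spec_assess_project_capability assess_project_capability assess_project_capability_alt
  by_cases h : (lang == "python") = true <;>
    simp [h, pvFoldPy, pvFoldJava]
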